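-- pv_equiv track=rewrite | github.com/jerzeuek/UWr_projects | Artificial Intelligence (Python)/W3/zad1.py | clear_domain
-- ===== SOURCE A (Python) =====
-- def clear_domain(cells, domain, color, is_row):   # remove not fitting possibilities from domain
--     if is_row:
--         for r, c in cells:
--             to_clear = []
--             for poss in domain[c]:
--                 if poss[r] != color:
--                     to_clear.append(poss)
--             for rm in to_clear:
--                 domain[c] -= {rm}
--     else:
--         for r, c in cells:
--             to_clear = []
--             for poss in domain[r]:
--                 if poss[c] != color:
--                     to_clear.append(poss)
--             for rm in to_clear:
--                 domain[r] -= {rm}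
--     return domain
-- ===== SOURCE B (Python) =====
-- def clear_domain(cells, domain, color, is_row):
--     # Group the cells by domain key first, then rebuild each touched set once.
--     index = {}
--     for r, c in cells:
--         if is_row:
--             index.setdefault(c, []).append(r)
--         else:
--             index.setdefault(r, []).append(c)
--     for key, idxs in index.items():
--         domain[key] = {p for p in domain[key]
--                        if all(p[i] == color for i in idxs)}
--     return domain
-- ===== Notes on version B (the rewrite author's own statement) =====
-- stated objective: alternative
-- what changed: Instead of re-scanning and subtracting from a key's set once per cell, B first groups the cells' indices by dict key in one pass and then rebuilds each touched set once with a single all()-filtered comprehension.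
import Mathlib
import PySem

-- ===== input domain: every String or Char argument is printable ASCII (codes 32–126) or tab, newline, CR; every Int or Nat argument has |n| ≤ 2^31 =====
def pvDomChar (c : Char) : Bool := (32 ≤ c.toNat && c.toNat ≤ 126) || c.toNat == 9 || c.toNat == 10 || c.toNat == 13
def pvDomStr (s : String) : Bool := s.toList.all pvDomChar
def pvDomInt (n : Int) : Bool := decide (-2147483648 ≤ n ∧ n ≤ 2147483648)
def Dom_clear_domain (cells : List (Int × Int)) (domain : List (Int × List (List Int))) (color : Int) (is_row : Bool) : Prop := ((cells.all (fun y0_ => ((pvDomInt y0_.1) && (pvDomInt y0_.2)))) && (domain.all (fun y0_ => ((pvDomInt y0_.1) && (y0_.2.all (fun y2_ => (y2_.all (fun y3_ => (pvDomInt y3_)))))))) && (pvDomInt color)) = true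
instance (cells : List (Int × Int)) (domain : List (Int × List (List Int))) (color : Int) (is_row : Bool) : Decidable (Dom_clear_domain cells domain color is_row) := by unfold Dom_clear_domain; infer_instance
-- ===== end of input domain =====

-- B groups cells by key once and rebuilds each touched set with a single all()-filtered pass,
-- instead of A's per-cell re-scan + element-by-element set subtraction ("alternative").
-- Both Pythons mutate the `domain` dict argument in place (A additionally mutates the set
-- objects themselves where B binds fresh sets); the equivalence proved here is about the
-- returned value.

-- ===== PORT A =====
def clear_domain (cells : List (Int × Int)) (domain : List (Int × List (List Int))) (color : Int) (is_row : Bool) : List (Int × List (List Int)) :=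
  if is_row then
    (cells.foldl (fun d rc =>
      let to_clear : List (List Int) :=
        (PySem.Dict.getD d rc.2 []).foldl
          (fun acc poss => if PySem.List.pyGetD poss rc.1 0 ≠ color then acc ++ [poss] else acc) []
      to_clear.foldl (fun d' rm =>
        PySem.Dict.insert d' rc.2 (PySem.Set.diff (PySem.Dict.getD d' rc.2 []) [rm])) d)
      (PySem.Dict.mk domain)).items
  else
    (cells.foldl (fun d rc =>
      let to_clear : List (List Int) :=
        (PySem.Dict.getD d rc.1 []).foldl
          (fun acc poss => if PySem.List.pyGetD poss rc.2 0 ≠ color then acc ++ [poss] else acc) []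
      to_clear.foldl (fun d' rm =>
        PySem.Dict.insert d' rc.1 (PySem.Set.diff (PySem.Dict.getD d' rc.1 []) [rm])) d)
      (PySem.Dict.mk domain)).items

-- ===== PORT B =====
def clear_domain_alt (cells : List (Int × Int)) (domain : List (Int × List (List Int))) (color : Int) (is_row : Bool) : List (Int × List (List Int)) :=
  let index : PySem.Dict Int (List Int) :=
    cells.foldl (fun ix rc =>
      if is_row then PySem.Dict.modify ix rc.2 [] (fun l => l ++ [rc.1])
      else PySem.Dict.modify ix rc.1 [] (fun l => l ++ [rc.2])) PySem.Dict.empty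
  (index.items.foldl (fun d ki =>
      PySem.Dict.insert d ki.1 ((PySem.Dict.getD d ki.1 []).filter
        (fun p => ki.2.all (fun i => PySem.List.pyGetD p i 0 == color)))) (PySem.Dict.mk domain)).items

-- ===== PRECONDITION & SPEC =====
-- pvOkIdx color p idxs: scanning the indices a key applies to possibility p in cell order,
-- p is indexed while it survives (all earlier indices matched color); true iff no index that
-- is actually reached is out of range — i.e. Python raises no IndexError on p.
def pvOkIdx (color : Int) (p : List Int) : List Int → Bool
  | [] => true
  | i :: rest =>
      decide (PySem.Raise.InRange p.length i) &&
      (if PySem.List.pyGetD p i 0 = color then pvOkIdx color p rest else true)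

-- Pre_: exactly the inputs on which Python A returns normally — every referenced key is present
-- (else KeyError) and no possibility is indexed out of range before it is removed (else
-- IndexError, the pvOkIdx condition) — plus the dict representation invariant that `domain`'s
-- keys are distinct (every Python dict satisfies it).
def Pre_clear_domain (cells : List (Int × Int)) (domain : List (Int × List (List Int))) (color : Int) (is_row : Bool) : Prop :=
  (domain.map (fun e => e.1)).Nodup ∧
  (∀ rc ∈ cells, (if is_row then rc.2 else rc.1) ∈ domain.map (fun e => e.1)) ∧
  ∀ e ∈ domain, ∀ p ∈ e.2,
    pvOkIdx color p
      ((cells.filter (fun rc => (if is_row then rc.2 else rc.1) == e.1)).map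
        (fun rc => if is_row then rc.1 else rc.2)) = true
instance (cells : List (Int × Int)) (domain : List (Int × List (List Int))) (color : Int) (is_row : Bool) : Decidable (Pre_clear_domain cells domain color is_row) := by unfold Pre_clear_domain; infer_instance

def pvWitness_clear_domain : (List (Int × Int)) × (List (Int × List (List Int))) × Int × Bool :=
  ([(0, 0), (1, 0)], [(0, [[1, 2], [2, 2]]), (1, [[1, 1]])], 2, true)

def Spec_clear_domain (cells : List (Int × Int)) (domain : List (Int × List (List Int))) (color : Int) (is_row : Bool) (out : List (Int × List (List Int))) : Prop := out = clear_domain_alt cells domain color is_row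
instance (cells : List (Int × Int)) (domain : List (Int × List (List Int))) (color : Int) (is_row : Bool) (out : List (Int × List (List Int))) : Decidable (Spec_clear_domain cells domain color is_row out) := by unfold Spec_clear_domain; infer_instance

-- ===== CLAIM (what is proved, stated in full; the proofs are below) =====
def Claim_equal_clear_domain : Prop := ∀ (cells : List (Int × Int)) (domain : List (Int × List (List Int))) (color : Int) (is_row : Bool), Dom_clear_domain cells domain color is_row → Pre_clear_domain cells domain color is_row → Spec_clear_domain cells domain color is_row (clear_domain cells domain color is_row)

-- ===== LEMMAS AND PROOFS =====

theorem pv_insert_getD_self (d : PySem.Dict Int (List (List Int))) (k : Int)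
    (hn : d.keys.Nodup) (hc : d.contains k = true) :
    d.insert k (d.getD k []) = d := by
  apply PySem.Dict.ext
  rw [PySem.Dict.items_insert_of_contains d (d.getD k []) hc]
  apply (List.map_congr_left ?_).trans (List.map_id _)
  intro e he
  by_cases h : e.1 = k
  · have hm : (e.1, e.2) ∈ d.items := he
    rw [h] at hm
    have := PySem.Dict.getD_of_mem_items d hm hn []
    simp only [h, this, beq_self_eq_true, if_true, id]
    rw [← h]
  · simp [h]

theorem pv_removal_fold (k : Int) (l : List (List Int)) (d : PySem.Dict Int (List (List Int)))
    (hn : d.keys.Nodup) (hc : d.contains k = true) :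
    l.foldl (fun d' rm => PySem.Dict.insert d' k (PySem.Set.diff (PySem.Dict.getD d' k []) [rm])) d
      = d.insert k ((d.getD k []).filter (fun x => !(l.contains x))) := by
  induction l generalizing d with
  | nil => simpa using (pv_insert_getD_self d k hn hc).symm
  | cons rm l ih =>
    simp only [List.foldl_cons]
    rw [ih (d.insert k (PySem.Set.diff (d.getD k []) [rm]))
        (by rw [PySem.Dict.keys_insert_of_contains d _ hc]; exact hn)
        (by simp)]
    rw [PySem.Dict.insert_insert_self, PySem.Dict.getD_insert_self]
    congr 1
    simp only [PySem.Set.diff, List.filter_filter]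
    apply List.filter_congr
    intro x _
    simp [Bool.and_comm]

theorem pv_append_fold (q : List Int → Bool) (l acc : List (List Int)) :
    l.foldl (fun acc x => if q x then acc ++ [x] else acc) acc = acc ++ l.filter q := by
  induction l generalizing acc with
  | nil => simp
  | cons x l ih =>
    by_cases h : q x <;> simp [h, ih]

def pvPred (color i : Int) (p : List Int) : Bool := PySem.List.pyGetD p i 0 == color
def pvStep (d : PySem.Dict Int (List (List Int))) (o : Int × (List Int → Bool)) : PySem.Dict Int (List (List Int)) :=
  PySem.Dict.insert d o.1 ((PySem.Dict.getD d o.1 []).filter o.2)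
def pvOps (kf vf : Int × Int → Int) (color : Int) (cells : List (Int × Int)) : List (Int × (List Int → Bool)) :=
  cells.map (fun rc => (kf rc, pvPred color (vf rc)))

theorem pv_cellA (k i color : Int) (d : PySem.Dict Int (List (List Int)))
    (hn : d.keys.Nodup) (hc : d.contains k = true) :
    ((PySem.Dict.getD d k []).foldl
        (fun acc poss => if PySem.List.pyGetD poss i 0 ≠ color then acc ++ [poss] else acc) []).foldl
      (fun d' rm => PySem.Dict.insert d' k (PySem.Set.diff (PySem.Dict.getD d' k []) [rm])) d
    = pvStep d (k, pvPred color i) := by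
  have h1 : ((PySem.Dict.getD d k []).foldl
        (fun acc poss => if PySem.List.pyGetD poss i 0 ≠ color then acc ++ [poss] else acc) [])
      = (d.getD k []).filter (fun x => decide (PySem.List.pyGetD x i 0 ≠ color)) := by
    simpa using pv_append_fold (fun x => decide (PySem.List.pyGetD x i 0 ≠ color)) (d.getD k []) []
  rw [h1, pv_removal_fold k _ d hn hc]
  unfold pvStep pvPred
  congr 1
  apply List.filter_congr
  intro x hx
  rw [Bool.eq_iff_iff]; simp [List.mem_filter, hx]

theorem pv_foldA (kf vf : Int × Int → Int) (color : Int) :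
    ∀ (cells : List (Int × Int)) (d : PySem.Dict Int (List (List Int))),
    d.keys.Nodup → (∀ rc ∈ cells, d.contains (kf rc) = true) →
    cells.foldl (fun d rc =>
      ((PySem.Dict.getD d (kf rc) []).foldl
          (fun acc poss => if PySem.List.pyGetD poss (vf rc) 0 ≠ color then acc ++ [poss] else acc) []).foldl
        (fun d' rm => PySem.Dict.insert d' (kf rc) (PySem.Set.diff (PySem.Dict.getD d' (kf rc) []) [rm])) d) d
    = (pvOps kf vf color cells).foldl pvStep d := by
  intro cells
  induction cells with
  | nil => intro d _ _; rfl
  | cons rc cs ih =>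
    intro d hn hc
    simp only [List.foldl_cons, pvOps, List.map_cons]
    rw [pv_cellA (kf rc) (vf rc) color d hn (hc rc (by simp))]
    have hkeys : (pvStep d (kf rc, pvPred color (vf rc))).keys = d.keys :=
      PySem.Dict.keys_insert_of_contains d _ (hc rc (by simp))
    exact ih _ (hkeys ▸ hn) (fun rc' h' => by
      rw [PySem.Dict.contains_iff_mem_keys, hkeys, ← PySem.Dict.contains_iff_mem_keys]
      exact hc rc' (List.mem_cons_of_mem _ h'))

theorem pv_foldSteps :
    ∀ (ops : List (Int × (List Int → Bool))) (d : PySem.Dict Int (List (List Int))),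
    d.keys.Nodup → (∀ o ∈ ops, d.contains o.1 = true) →
    (ops.foldl pvStep d).items
      = d.items.map (fun e =>
          (e.1, e.2.filter (fun p => (ops.filter (fun o => o.1 == e.1)).all (fun o => o.2 p)))) := by
  intro ops
  induction ops with
  | nil =>
    intro d _ _
    simp
  | cons o ops ih =>
    intro d hn hc
    have hco : d.contains o.1 = true := hc o (by simp)
    have hkeys : (pvStep d o).keys = d.keys := PySem.Dict.keys_insert_of_contains d _ hco
    simp only [List.foldl_cons]
    rw [ih (pvStep d o) (hkeys ▸ hn) (fun o' h' => by
      rw [PySem.Dict.contains_iff_mem_keys, hkeys, ← PySem.Dict.contains_iff_mem_keys]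
      exact hc o' (List.mem_cons_of_mem _ h'))]
    show ((d.insert o.1 ((d.getD o.1 []).filter o.2)).items.map _) = _
    rw [PySem.Dict.items_insert_of_contains d _ hco, List.map_map]
    apply List.map_congr_left
    intro e he
    by_cases h : e.1 = o.1
    · have hm : (e.1, e.2) ∈ d.items := he
      rw [h] at hm
      have hg := PySem.Dict.getD_of_mem_items d hm hn []
      simp only [Function.comp, h, beq_self_eq_true, if_true, hg, List.filter_cons,
        beq_self_eq_true, if_true]
      rw [List.filter_filter]
      congr 1
      apply List.filter_congr
      intro p _
      simp [Bool.and_comm]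
    · have hne : (e.1 == o.1) = false := by simp [h]
      have hne2 : (o.1 == e.1) = false := by simp; exact fun he => h he.symm
      simp only [Function.comp, hne, Bool.false_eq_true, if_false, List.filter_cons, hne2]

def pvIdxs (kf vf : Int × Int → Int) (cells : List (Int × Int)) (k : Int) : List Int :=
  (cells.filter (fun rc => kf rc == k)).map vf

theorem pv_index (kf vf : Int × Int → Int) (cells : List (Int × Int)) :
    (cells.foldl (fun ix rc => PySem.Dict.modify ix (kf rc) [] (fun l => l ++ [vf rc])) PySem.Dict.empty).items
      = (PySem.Set.ofList (cells.map kf)).map (fun k => (k, pvIdxs kf vf cells k)) := by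
  have hfold : (cells.foldl (fun ix rc => PySem.Dict.modify ix (kf rc) [] (fun l => l ++ [vf rc])) PySem.Dict.empty)
      = (cells.map (fun rc => (kf rc, vf rc))).foldl (fun d p => d.modify p.1 [] (fun l => l ++ [p.2])) PySem.Dict.empty := by
    rw [List.foldl_map]
  have hkeys : (cells.foldl (fun ix rc => PySem.Dict.modify ix (kf rc) [] (fun l => l ++ [vf rc])) PySem.Dict.empty).keys
      = PySem.Set.ofList (cells.map kf) := by
    rw [PySem.Dict.keys_foldl_modify_key]
    simp [PySem.Dict.keys_empty, PySem.Set.update_nil_left]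
  have hnd : (cells.foldl (fun ix rc => PySem.Dict.modify ix (kf rc) [] (fun l => l ++ [vf rc])) PySem.Dict.empty).keys.Nodup := by
    rw [hkeys]; exact PySem.Set.nodup_ofList _
  rw [PySem.Dict.items_eq_map_keys _ hnd [], hkeys]
  apply List.map_congr_left
  intro k hk
  congr 1
  rw [hfold, PySem.Dict.getD_foldl_modify_append, PySem.Dict.getD_empty]
  simp only [List.nil_append, List.filter_map, List.map_map]
  rfl

theorem pv_filter_map_nodup {β : Type} (K : List Int) (F : Int → β) (x : Int) (hK : K.Nodup) :
    (K.map (fun k => (k, F k))).filter (fun o => o.1 == x)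
      = if x ∈ K then [(x, F x)] else [] := by
  induction K with
  | nil => simp
  | cons k K ih =>
    rcases List.nodup_cons.mp hK with ⟨hk, hK'⟩
    by_cases h : x = k
    · subst h
      simp [ih hK', if_neg hk]
    · have : (k == x) = false := by simp; exact fun he => h he.symm
      simp [this, ih hK', List.mem_cons, h]

theorem pv_master (kf vf : Int × Int → Int) (color : Int) (cells : List (Int × Int))
    (domain : List (Int × List (List Int)))
    (hn : (domain.map (fun e => e.1)).Nodup)
    (hc : ∀ rc ∈ cells, kf rc ∈ domain.map (fun e => e.1)) :
    (cells.foldl (fun d rc =>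
      ((PySem.Dict.getD d (kf rc) []).foldl
          (fun acc poss => if PySem.List.pyGetD poss (vf rc) 0 ≠ color then acc ++ [poss] else acc) []).foldl
        (fun d' rm => PySem.Dict.insert d' (kf rc) (PySem.Set.diff (PySem.Dict.getD d' (kf rc) []) [rm])) d)
      (PySem.Dict.mk domain)).items
    = (((cells.foldl (fun ix rc => PySem.Dict.modify ix (kf rc) [] (fun l => l ++ [vf rc])) PySem.Dict.empty).items).foldl
        (fun d ki => PySem.Dict.insert d ki.1 ((PySem.Dict.getD d ki.1 []).filter
          (fun p => ki.2.all (fun i => PySem.List.pyGetD p i 0 == color)))) (PySem.Dict.mk domain)).items := by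
  have hkeys : (PySem.Dict.mk domain).keys = domain.map (fun e => e.1) := by
    simp [PySem.Dict.keys]
  have hn' : (PySem.Dict.mk domain).keys.Nodup := by rw [hkeys]; exact hn
  have hcont : ∀ k : Int, k ∈ domain.map (fun e => e.1) → (PySem.Dict.mk domain).contains k = true := by
    intro k hk; rw [PySem.Dict.contains_iff_mem_keys, hkeys]; exact hk
  -- A side
  rw [pv_foldA kf vf color cells _ hn' (fun rc h => hcont _ (hc rc h)),
      pv_foldSteps _ _ hn' (by
        intro o ho
        simp only [pvOps, List.mem_map] at ho
        obtain ⟨rc, hrc, rfl⟩ := ho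
        exact hcont _ (hc rc hrc))]
  -- B side
  rw [pv_index kf vf cells]
  have hBfold : (((PySem.Set.ofList (cells.map kf)).map (fun k => (k, pvIdxs kf vf cells k))).foldl
        (fun d ki => PySem.Dict.insert d ki.1 ((PySem.Dict.getD d ki.1 []).filter
          (fun p => ki.2.all (fun i => PySem.List.pyGetD p i 0 == color)))) (PySem.Dict.mk domain))
      = ((PySem.Set.ofList (cells.map kf)).map (fun k =>
            ((k, fun p => (pvIdxs kf vf cells k).all (fun i => pvPred color i p)) : Int × (List Int → Bool)))).foldl
          pvStep (PySem.Dict.mk domain) := by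
    rw [List.foldl_map, List.foldl_map]
    rfl
  rw [hBfold, pv_foldSteps _ _ hn' (by
      intro o ho
      simp only [List.mem_map] at ho
      obtain ⟨k, hk, rfl⟩ := ho
      rw [PySem.Set.mem_ofList, List.mem_map] at hk
      obtain ⟨rc, hrc, rfl⟩ := hk
      exact hcont _ (hc rc hrc))]
  -- per-entry equality
  apply List.map_congr_left
  intro e _
  congr 1
  apply List.filter_congr
  intro p _
  -- A's conjunction over the cells with key e.1 = B's single grouped test
  have hA : ((pvOps kf vf color cells).filter (fun o => o.1 == e.1))
      = (cells.filter (fun rc => kf rc == e.1)).map (fun rc => (kf rc, pvPred color (vf rc))) := by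
    unfold pvOps
    rw [List.filter_map]
    rfl
  rw [hA, pv_filter_map_nodup _ _ _ (PySem.Set.nodup_ofList _)]
  by_cases hmem : e.1 ∈ PySem.Set.ofList (cells.map kf)
  · rw [if_pos hmem]
    unfold pvIdxs
    simp [List.all_map, pvPred]
  · rw [if_neg hmem]
    have : cells.filter (fun rc => kf rc == e.1) = [] := by
      rw [List.filter_eq_nil_iff]
      intro rc hrc
      simp only [beq_iff_eq]
      intro hkk
      exact hmem (by rw [PySem.Set.mem_ofList, List.mem_map]; exact ⟨rc, hrc, hkk⟩)
    simp [this]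

-- ===== VERDICT (by name: the statement is the Claim_ definition above) =====
theorem clear_domain_spec : Claim_equal_clear_domain := by
  intro cells domain color is_row _ hpre
  obtain ⟨hn, hkeys, _⟩ := hpre
  unfold Spec_clear_domain clear_domain clear_domain_alt
  cases is_row
  · simp only [Bool.false_eq_true, if_false]
    exact pv_master (fun rc => rc.1) (fun rc => rc.2) color cells domain hn
      (fun rc h => by simpa using (hkeys rc h))
  · simp only [if_true]
    exact pv_master (fun rc => rc.2) (fun rc => rc.1) color cells domain hn
      (fun rc h => by simpa using (hkeys rc h))
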